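-- pv_equiv track=rewrite | github.com/magladko/jpamb | project/syntactic_analysis.py | find_keyword_comments
-- ===== SOURCE A (Python) =====
-- COMMENT_KEYWORDS = [
--     "DO NOT DELETE", "FIXME", "TODO", "IMPORTANT", "TEMP", "DEBUG", "HACK"
-- ]
--
-- def find_keyword_comments(comments):
--     """Finds comments with important keywords."""
--     hits = []
--     for c in comments:
--         for kw in COMMENT_KEYWORDS:
--             if kw.lower() in c.lower():
--                 hits.append(c)
--                 break
--     return hits
-- ===== SOURCE B (Python) =====
-- COMMENT_KEYWORDS = [
--     "DO NOT DELETE", "FIXME", "TODO", "IMPORTANT", "TEMP", "DEBUG", "HACK"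
-- ]
--
-- _KW_LOWER = [kw.lower() for kw in COMMENT_KEYWORDS]
--
-- def _has_keyword(low):
--     # position-based multi-pattern scan: try every start position once
--     return any(low.startswith(kw, i) for i in range(len(low)) for kw in _KW_LOWER)
--
-- def find_keyword_comments(comments):
--     """Finds comments with important keywords."""
--     return [c for c in comments if _has_keyword(c.lower())]
-- ===== Notes on version B (the rewrite author's own statement) =====
-- stated objective: alternative
-- what changed: Replaces the per-keyword substring test (each doing its own scan over a re-lowered comment) by a single position-based multi-pattern scan: the comment is lowercased once and each start position is tried against the pre-lowercased keyword list.
import Mathlib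
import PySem

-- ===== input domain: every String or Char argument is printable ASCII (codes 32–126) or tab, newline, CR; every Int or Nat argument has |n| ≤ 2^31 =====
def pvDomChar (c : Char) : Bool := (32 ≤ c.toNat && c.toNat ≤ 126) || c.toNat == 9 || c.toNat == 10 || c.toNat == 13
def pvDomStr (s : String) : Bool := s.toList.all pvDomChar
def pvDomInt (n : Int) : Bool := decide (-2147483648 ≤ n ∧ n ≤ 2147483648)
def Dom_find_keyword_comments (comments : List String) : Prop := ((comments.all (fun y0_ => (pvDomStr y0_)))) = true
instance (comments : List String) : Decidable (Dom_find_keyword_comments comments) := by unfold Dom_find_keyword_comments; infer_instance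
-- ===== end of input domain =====

-- B replaces A's per-keyword substring tests (each re-lowering the comment) by one
-- position-based scan of the once-lowered comment against pre-lowered keywords (alternative).

-- ===== PORT A =====
def COMMENT_KEYWORDS : List String :=
  ["DO NOT DELETE", "FIXME", "TODO", "IMPORTANT", "TEMP", "DEBUG", "HACK"]

-- A's inner 'for kw in COMMENT_KEYWORDS: … break' loop: true iff some keyword matched
def aInner (c : String) : List String → Bool
  | [] => false
  | kw :: rest =>
    if PySem.Str.isIn (PySem.Str.lower kw) (PySem.Str.lower c) then true else aInner c rest

def find_keyword_comments (comments : List String) : List String :=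
  comments.foldl (fun hits c => if aInner c COMMENT_KEYWORDS then hits ++ [c] else hits) []

-- ===== PORT B =====
def kwLower : List (List Char) := COMMENT_KEYWORDS.map (fun kw => PySem.Chars.lower kw.toList)

-- Source B's _has_keyword: try every start position i, each against every lowered keyword
def hasKeyword (low : List Char) : Bool :=
  (List.range low.length).any (fun i => kwLower.any (fun kw => PySem.Chars.startswith (low.drop i) kw))

def find_keyword_comments_alt (comments : List String) : List String :=
  comments.filter (fun c => hasKeyword (PySem.Chars.lower c.toList))

-- ===== PRECONDITION & SPEC =====
def Spec_find_keyword_comments (comments : List String) (out : List String) : Prop := out = find_keyword_comments_alt comments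
instance (comments : List String) (out : List String) : Decidable (Spec_find_keyword_comments comments out) := by unfold Spec_find_keyword_comments; infer_instance

-- ===== CLAIM (what is proved, stated in full; the proofs are below) =====
def Claim_equal_find_keyword_comments : Prop := ∀ (comments : List String), Dom_find_keyword_comments comments → Spec_find_keyword_comments comments (find_keyword_comments comments)

-- ===== LEMMAS AND PROOFS =====

-- A's break-loop is an existence test over the keyword list
theorem aInner_eq_any (c : String) (ks : List String) :
    aInner c ks = ks.any (fun kw => PySem.Chars.isIn (PySem.Chars.lower kw.toList) (PySem.Chars.lower c.toList)) := by
  induction ks with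
  | nil => rfl
  | cons kw rest ih =>
    simp only [aInner, List.any_cons, PySem.Str.isIn_eq, PySem.Str.toList_lower]
    by_cases h : PySem.Chars.isIn (PySem.Chars.lower kw.toList) (PySem.Chars.lower c.toList) = true
    · simp [h]
    · simp only [Bool.not_eq_true] at h; simp [h, ih]

-- a position-by-position prefix scan equals Python's 'sub in s' for a nonempty pattern
theorem scan_eq_isIn (s sub : List Char) (hsub : sub ≠ []) :
    ((List.range s.length).any (fun i => PySem.Chars.startswith (s.drop i) sub)) = PySem.Chars.isIn sub s := by
  apply Bool.eq_iff_iff.mpr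
  rw [← PySem.Chars.exists_prefix_drop_iff_isIn]
  simp only [List.any_eq_true, List.mem_range, PySem.Chars.startswith_iff]
  constructor
  · rintro ⟨i, _, h⟩; exact ⟨i, h⟩
  · rintro ⟨j, h⟩
    refine ⟨j, ?_, h⟩
    by_contra hj
    push Not at hj
    rw [List.drop_eq_nil_of_le hj] at h
    exact hsub (List.prefix_nil.mp h)

theorem kwLower_ne_nil : ∀ kw ∈ kwLower, kw ≠ [] := by decide

theorem hasKeyword_eq (low : List Char) :
    hasKeyword low = kwLower.any (fun kw => PySem.Chars.isIn kw low) := by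
  unfold hasKeyword
  apply Bool.eq_iff_iff.mpr
  simp only [List.any_eq_true]
  constructor
  · rintro ⟨i, hi, kw, hkw, h⟩
    refine ⟨kw, hkw, ?_⟩
    rw [← scan_eq_isIn low kw (kwLower_ne_nil kw hkw)]
    exact List.any_eq_true.mpr ⟨i, hi, h⟩
  · rintro ⟨kw, hkw, h⟩
    rw [← scan_eq_isIn low kw (kwLower_ne_nil kw hkw)] at h
    obtain ⟨i, hi, h⟩ := List.any_eq_true.mp h
    exact ⟨i, hi, kw, hkw, h⟩

theorem pred_eq (c : String) :
    aInner c COMMENT_KEYWORDS = hasKeyword (PySem.Chars.lower c.toList) := by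
  rw [hasKeyword_eq, aInner_eq_any, kwLower, List.any_map]
  rfl

-- ===== VERDICT (by name: the statement is the Claim_ definition above) =====
theorem find_keyword_comments_spec : Claim_equal_find_keyword_comments := by
  intro comments _
  show find_keyword_comments comments = find_keyword_comments_alt comments
  unfold find_keyword_comments find_keyword_comments_alt
  rw [PySem.List.foldl_append_if_eq_filter]
  simp only [List.nil_append]
  apply List.filter_congr
  intro c _
  exact pred_eq c
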